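-- pv_equiv track=rewrite | github.com/ALTA-DE2-Winardi-10April1997/Algo-DS-Part2 | problem4/main.py | count_item_and_sort
-- ===== SOURCE A (Python) =====
-- def count_item_and_sort(items):
--     result = ""
--     count_items = {}
--     for item in items:
--         if item in count_items:
--             count_items[item] += 1
--         else:
--             count_items[item] = 1
--
--     sorted_count = sorted(count_items.items(), key=lambda x: (x[1], x[0]))
--     result = " ".join([f"{key}->{value}" for key, value in sorted_count])
--     return result
-- ===== SOURCE B (Python) =====
-- def count_item_and_sort(items):
--     s = sorted(items)
--     pairs = []
--     if s:
--         cur, n = s[0], 1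
--         for x in s[1:]:
--             if x == cur:
--                 n += 1
--             else:
--                 pairs.append((cur, n))
--                 cur, n = x, 1
--         pairs.append((cur, n))
--     pairs.sort(key=lambda p: (p[1], p[0]))
--     return " ".join(f"{k}->{v}" for k, v in pairs)
-- ===== Notes on version B (the rewrite author's own statement) =====
-- stated objective: alternative
-- what changed: Counts by sorting the items and scanning consecutive runs instead of maintaining an incremental hash-map of counts.
import Mathlib
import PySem

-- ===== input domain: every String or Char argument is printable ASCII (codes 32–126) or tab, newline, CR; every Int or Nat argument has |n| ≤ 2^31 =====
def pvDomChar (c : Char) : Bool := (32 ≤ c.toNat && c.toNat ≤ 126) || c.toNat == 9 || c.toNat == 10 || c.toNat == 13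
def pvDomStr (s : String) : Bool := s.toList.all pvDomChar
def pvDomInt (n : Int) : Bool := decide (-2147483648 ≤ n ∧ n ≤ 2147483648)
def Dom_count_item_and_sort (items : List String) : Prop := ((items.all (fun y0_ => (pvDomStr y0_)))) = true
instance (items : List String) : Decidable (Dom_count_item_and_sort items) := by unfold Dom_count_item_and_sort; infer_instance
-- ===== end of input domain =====

-- B counts by sorting the items and scanning consecutive runs instead of A's incremental
-- hash-map of counts; same output (return value only), proved equal on the whole domain.

-- ===== PORT A =====
def count_item_and_sort (items : List String) : String :=
  let count_items :=
    items.foldl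
      (fun d item =>
        if d.contains item then d.insert item (d.getD item 0 + 1) else d.insert item 1)
      PySem.Dict.empty
  let sorted_count := PySem.List.sorted2 count_items.items (fun x => x.2) (fun x => x.1)
  PySem.Str.join " " (sorted_count.map (fun p => p.1 ++ "->" ++ PySem.Int.toStr p.2))

-- ===== PORT B =====
-- the run-counting scan over the sorted list (Source B's for-loop with its (pairs, cur, n) state)
def pvRunsGo (cur : String) (n : Int) : List String → List (String × Int)
  | [] => [(cur, n)]
  | y :: ys => if y == cur then pvRunsGo cur (n + 1) ys else (cur, n) :: pvRunsGo y 1 ys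

def count_item_and_sort_alt (items : List String) : String :=
  let s := PySem.List.sorted items (fun x => x)
  let pairs : List (String × Int) :=
    match s with
    | [] => []
    | x :: xs => pvRunsGo x 1 xs
  let pairs2 := PySem.List.sorted2 pairs (fun p => p.2) (fun p => p.1)
  PySem.Str.join " " (pairs2.map (fun p => p.1 ++ "->" ++ PySem.Int.toStr p.2))

-- ===== PRECONDITION & SPEC =====
def Spec_count_item_and_sort (items : List String) (out : String) : Prop := out = count_item_and_sort_alt items
instance (items : List String) (out : String) : Decidable (Spec_count_item_and_sort items out) := by unfold Spec_count_item_and_sort; infer_instance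

-- ===== CLAIM (what is proved, stated in full; the proofs are below) =====
def Claim_equal_count_item_and_sort : Prop := ∀ (items : List String), Dom_count_item_and_sort items → Spec_count_item_and_sort items (count_item_and_sort items)

-- ===== LEMMAS AND PROOFS =====

-- A's counting loop is Counter(items)
lemma pvAFold_eq_counter (items : List String) :
    items.foldl
      (fun d item =>
        if d.contains item then d.insert item (d.getD item 0 + 1) else d.insert item 1)
      PySem.Dict.empty = PySem.Dict.counter items := by
  rw [← PySem.Dict.foldl_insert_getD_add_one_eq_counter]
  have hf : (fun (d : PySem.Dict String Int) item =>
        if d.contains item then d.insert item (d.getD item 0 + 1) else d.insert item 1)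
      = fun d x => d.insert x (d.getD x 0 + 1) := by
    funext d x
    by_cases h : d.contains x
    · simp [h]
    · simp only [h, Bool.false_eq_true, if_false]
      rw [PySem.Dict.getD_of_not_contains _ _ (by simpa using h)]
      norm_num
  rw [hf]

-- membership in the run scan of a sorted tail
lemma pvRunsGo_mem (l : List String) (cur : String) (n : Int) (p : String × Int)
    (hs : l.Pairwise (· ≤ ·)) (hge : ∀ y ∈ l, cur ≤ y) :
    p ∈ pvRunsGo cur n l ↔
      p = (cur, n + (l.count cur : Int)) ∨ ∃ k ∈ l, k ≠ cur ∧ p = (k, (l.count k : Int)) := by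
  induction l generalizing cur n with
  | nil => simp [pvRunsGo]
  | cons y ys ih =>
    have hs' := List.pairwise_cons.mp hs
    by_cases hy : y = cur
    · subst hy
      simp only [pvRunsGo, beq_self_eq_true, if_true]
      rw [ih y (n + 1) hs'.2 hs'.1]
      constructor
      · rintro (hp | ⟨k, hk, hkne, hp⟩)
        · left
          rw [hp, List.count_cons_self]
          push_cast
          congr 1
          ring
        · exact Or.inr ⟨k, List.mem_cons_of_mem _ hk, hkne,
            by rw [hp, List.count_cons_of_ne (Ne.symm hkne)]⟩
      · rintro (hp | ⟨k, hk, hkne, hp⟩)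
        · left
          rw [hp, List.count_cons_self]
          push_cast
          congr 1
          ring
        · rcases List.mem_cons.mp hk with hk | hk
          · exact absurd hk hkne
          · exact Or.inr ⟨k, hk, hkne, by rw [hp, List.count_cons_of_ne (Ne.symm hkne)]⟩
    · have hlt : cur < y := lt_of_le_of_ne (hge y (List.mem_cons_self)) (fun h => hy h.symm)
      have hcur0 : (y :: ys).count cur = 0 := by
        rw [List.count_eq_zero]
        rintro (h | h)
        · exact hy rfl
        · rename_i hmem
          exact absurd rfl ((hlt.trans_le (hs'.1 cur hmem)).ne')
      simp only [pvRunsGo, beq_eq_false_iff_ne.mpr hy, Bool.false_eq_true, if_false]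
      rw [List.mem_cons, ih y 1 hs'.2 hs'.1]
      constructor
      · rintro (hp | hp | ⟨k, hk, hkne, hp⟩)
        · left
          rw [hp, hcur0]
          simp
        · refine Or.inr ⟨y, List.mem_cons_self, hy, ?_⟩
          rw [hp, List.count_cons_self]
          push_cast
          congr 1
          ring
        · refine Or.inr ⟨k, List.mem_cons_of_mem _ hk,
            (hlt.trans_le (hs'.1 k hk)).ne', ?_⟩
          rw [hp, List.count_cons_of_ne (Ne.symm hkne)]
      · rintro (hp | ⟨k, hk, hkne, hp⟩)
        · left
          rw [hp, hcur0]
          simp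
        · rcases List.mem_cons.mp hk with hk | hk
          · subst hk
            refine Or.inr (Or.inl ?_)
            rw [hp, List.count_cons_self]
            push_cast
            congr 1
            ring
          · by_cases hky : k = y
            · subst hky
              refine Or.inr (Or.inl ?_)
              rw [hp, List.count_cons_self]
              push_cast
              congr 1
              ring
            · exact Or.inr (Or.inr ⟨k, hk, hky,
                by rw [hp, List.count_cons_of_ne (Ne.symm hky)]⟩)

-- keys produced by the run scan are distinct
lemma pvRunsGo_nodup (l : List String) (cur : String) (n : Int)
    (hs : l.Pairwise (· ≤ ·)) (hge : ∀ y ∈ l, cur ≤ y) :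
    ((pvRunsGo cur n l).map Prod.fst).Nodup := by
  induction l generalizing cur n with
  | nil => simp [pvRunsGo]
  | cons y ys ih =>
    have hs' := List.pairwise_cons.mp hs
    by_cases hy : y = cur
    · subst hy
      simp only [pvRunsGo, beq_self_eq_true, if_true]
      exact ih y (n + 1) hs'.2 hs'.1
    · have hlt : cur < y := lt_of_le_of_ne (hge y (List.mem_cons_self)) (fun h => hy h.symm)
      simp only [pvRunsGo, beq_eq_false_iff_ne.mpr hy, Bool.false_eq_true, if_false,
        List.map_cons, List.nodup_cons]
      refine ⟨?_, ih y 1 hs'.2 hs'.1⟩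
      intro hmem
      rcases List.mem_map.mp hmem with ⟨q, hq, hq1⟩
      rcases (pvRunsGo_mem ys y 1 q hs'.2 hs'.1).mp hq with hp | ⟨k, hk, _, hp⟩
      · rw [hp] at hq1
        exact hy hq1
      · rw [hp] at hq1
        exact absurd hq1 ((hlt.trans_le (hs'.1 k hk)).ne')

-- B's pair list is a permutation of A's dict items
lemma pvPairs_perm (items : List String) :
    (match PySem.List.sorted items (fun x => x) with
      | [] => ([] : List (String × Int))
      | x :: xs => pvRunsGo x 1 xs).Perm
      ((PySem.Set.ofList items).map (fun k => (k, (items.count k : Int)))) := by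
  have hperm : (PySem.List.sorted items (fun x => x)).Perm items :=
    PySem.List.sorted_perm items (fun x => x) false
  have hpw : (PySem.List.sorted items (fun x => x)).Pairwise (· ≤ ·) :=
    PySem.List.sorted_pairwise items (fun x => x)
  rcases hc : PySem.List.sorted items (fun x => x) with _ | ⟨x, xs⟩
  · rw [hc] at hperm
    have : items = [] := List.perm_nil.mp hperm.symm
    simp [this]
  · rw [hc] at hperm hpw
    have hs' := List.pairwise_cons.mp hpw
    have hxitems : x ∈ items := hperm.mem_iff.mp List.mem_cons_self
    have hcx : items.count x = xs.count x + 1 := by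
      rw [← hperm.count_eq, List.count_cons_self]
    refine (List.perm_ext_iff_of_nodup
      (List.Nodup.of_map Prod.fst (pvRunsGo_nodup xs x 1 hs'.2 hs'.1))
      (List.Nodup.map (fun a b h => congrArg Prod.fst h) (PySem.Set.nodup_ofList items))).mpr ?_
    intro p
    rw [pvRunsGo_mem xs x 1 p hs'.2 hs'.1, List.mem_map]
    constructor
    · rintro (hp | ⟨k, hk, hkne, hp⟩)
      · refine ⟨x, (PySem.Set.mem_ofList items x).mpr hxitems, ?_⟩
        rw [hp, hcx]
        refine Prod.ext rfl ?_
        push_cast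
        ring
      · refine ⟨k, (PySem.Set.mem_ofList items k).mpr
          (hperm.mem_iff.mp (List.mem_cons_of_mem _ hk)), ?_⟩
        rw [hp, ← hperm.count_eq, List.count_cons_of_ne (Ne.symm hkne)]
    · rintro ⟨k, hkS, rfl⟩
      have hkitems : k ∈ items := (PySem.Set.mem_ofList items k).mp hkS
      rcases List.mem_cons.mp (hperm.mem_iff.mpr hkitems) with hk | hk
      · subst hk
        left
        rw [hcx]
        refine Prod.ext rfl ?_
        push_cast
        ring
      · by_cases hky : k = x
        · subst hky
          left
          rw [hcx]
          refine Prod.ext rfl ?_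
          push_cast
          ring
        · exact Or.inr ⟨k, hk, hky,
            Prod.ext rfl (by rw [← hperm.count_eq, List.count_cons_of_ne (Ne.symm hky)])⟩

-- sorted2 is sorted under the lexicographic key
lemma pvSorted2_eq_sorted_lex (xs : List (String × Int)) :
    PySem.List.sorted2 xs (fun p => p.2) (fun p => p.1) =
      PySem.List.sorted xs (fun p => toLex (p.2, p.1)) := by
  unfold PySem.List.sorted2 PySem.List.sorted
  simp only [if_neg (by decide : ¬ (false = true))]
  have hb : (fun (a b : String × Int) => decide (a.2 < b.2) || (!decide (b.2 < a.2) && decide (a.1 < b.1)))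
      = fun (a b : String × Int) => decide (toLex (a.2, a.1) < toLex (b.2, b.1)) := by
    funext a b
    rcases lt_trichotomy a.2 b.2 with h | h | h
    · simp [Prod.Lex.toLex_lt_toLex, h, lt_asymm h]
    · simp [Prod.Lex.toLex_lt_toLex, h]
    · simp [Prod.Lex.toLex_lt_toLex, lt_asymm h, h.ne', h]
  rw [hb]

-- ===== VERDICT (by name: the statement is the Claim_ definition above) =====
theorem count_item_and_sort_spec : Claim_equal_count_item_and_sort := by
  intro items _
  unfold Spec_count_item_and_sort count_item_and_sort count_item_and_sort_alt
  simp only [pvAFold_eq_counter, PySem.Dict.items_counter, pvSorted2_eq_sorted_lex]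
  congr 1
  refine congrArg _ ?_
  refine PySem.List.sorted_eq_sorted_of_perm _ _ _ ?_ ?_
  · intro p q h
    have h1 := congrArg (fun z => (ofLex z).1) h
    have h2 := congrArg (fun z => (ofLex z).2) h
    exact Prod.ext h2 h1
  · exact (pvPairs_perm items).symm
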